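-- pv_equiv track=rewrite | github.com/hawkfish/bakersgame | board.py | isKingStack
-- ===== SOURCE A (Python) =====
-- king = 12
--
-- def pips(card):
--     return card % 13
--
-- def isKingStack( cascade ):
--     if not cascade: return False
--
--     prev = cascade[0]
--     if pips( prev ) != king: return False
--
--     for row, card in enumerate( cascade ):
--         if not row: continue
--         if prev != card + 1: return False
--         prev = card
--
--     return True
-- ===== SOURCE B (Python) =====
-- def isKingStack(cascade):
--     if not cascade:
--         return False
--     head = cascade[0]
--     if head % 13 != 12:
--         return False
--     return list(cascade) == list(range(head, head - len(cascade), -1))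
-- ===== Notes on version B (the rewrite author's own statement) =====
-- stated objective: alternative
-- what changed: Instead of scanning adjacent pairs with a running prev, B constructs the expected descending run range(head, head-len, -1) once and decides by a single list equality (generate-and-compare).
import Mathlib
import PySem

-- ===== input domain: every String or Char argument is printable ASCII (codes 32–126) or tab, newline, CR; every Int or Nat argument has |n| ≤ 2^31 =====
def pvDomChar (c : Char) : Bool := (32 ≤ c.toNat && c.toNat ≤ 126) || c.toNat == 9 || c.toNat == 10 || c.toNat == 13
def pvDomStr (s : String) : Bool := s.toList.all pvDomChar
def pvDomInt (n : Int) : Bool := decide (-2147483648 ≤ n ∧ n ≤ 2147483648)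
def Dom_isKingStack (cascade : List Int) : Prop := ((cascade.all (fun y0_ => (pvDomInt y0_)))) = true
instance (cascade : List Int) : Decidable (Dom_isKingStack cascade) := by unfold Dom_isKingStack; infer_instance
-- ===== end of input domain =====

-- B replaces A's running-prev adjacent-pair scan by constructing the expected descending run
-- range(head, head-len, -1) and deciding with one list equality; same cost, different strategy.

-- ===== PORT A =====
-- the for-loop over enumerate(cascade), threading prev, with 'continue' on row 0
def isKingStackLoop (prev : Int) : List (Int × Int) → Bool
  | [] => true
  | (row, card) :: rest =>
      if row == 0 then isKingStackLoop prev rest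
      else if prev ≠ card + 1 then false
      else isKingStackLoop card rest

def isKingStack (cascade : List Int) : Bool :=
  match cascade with
  | [] => false
  | c0 :: _ =>
      if PySem.Int.mod c0 13 ≠ 12 then false
      else isKingStackLoop c0 (PySem.List.enumerate cascade)

-- ===== PORT B =====
def isKingStack_alt (cascade : List Int) : Bool :=
  match cascade with
  | [] => false
  | head :: _ =>
      if PySem.Int.mod head 13 ≠ 12 then false
      else cascade == PySem.List.pyRange head (head - (cascade.length : Int)) (-1)

-- ===== PRECONDITION & SPEC =====
def Spec_isKingStack (cascade : List Int) (out : Bool) : Prop := out = isKingStack_alt cascade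
instance (cascade : List Int) (out : Bool) : Decidable (Spec_isKingStack cascade out) := by unfold Spec_isKingStack; infer_instance

-- ===== CLAIM (what is proved, stated in full; the proofs are below) =====
def Claim_equal_isKingStack : Prop := ∀ (cascade : List Int), Dom_isKingStack cascade → Spec_isKingStack cascade (isKingStack cascade)

-- ===== LEMMAS AND PROOFS =====

-- A's loop over the tail (rows ≥ 1, running value prev) decides exactly whether the tail
-- is the descending countdown starting at prev-1.
theorem isKingStackLoop_eq_range (t : List Int) :
    ∀ (s prev : Int), 1 ≤ s →
      isKingStackLoop prev (PySem.List.enumerate t s)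
        = (t == PySem.List.pyRange (prev - 1) (prev - 1 - (t.length : Int)) (-1)) := by
  induction t with
  | nil =>
      intro s prev _
      rw [PySem.List.enumerate_nil, PySem.List.pyRange_neg_one_eq_nil (by simp)]
      rfl
  | cons c rest ih =>
      intro s prev hs
      rw [PySem.List.enumerate_cons]
      simp only [isKingStackLoop]
      have hrow : (s == 0) = false := by simp; omega
      rw [hrow]
      simp only [Bool.false_eq_true, if_false]
      have hcons : PySem.List.pyRange (prev - 1) (prev - 1 - ((c :: rest).length : Int)) (-1)
          = (prev - 1) :: PySem.List.pyRange (prev - 2) (prev - 1 - ((c :: rest).length : Int)) (-1) := by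
        have := PySem.List.pyRange_neg_one_cons (a := prev - 1)
          (b := prev - 1 - ((c :: rest).length : Int)) (by simp)
        simpa [show prev - 1 - 1 = prev - 2 by ring] using this
      rw [hcons]
      by_cases hc : prev = c + 1
      · rw [if_neg (by omega)]
        rw [ih (s + 1) c (by omega)]
        subst hc
        rw [show c + 1 - 2 = c - 1 by ring,
            show c + 1 - 1 - (((c :: rest).length : Int)) = c - 1 - (rest.length : Int) by
              simp; omega]
        simp [List.cons_beq_cons, show c + 1 - 1 = c by ring]
      · rw [if_pos (by omega)]
        have heq : (c == prev - 1) = false := by simp; omega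
        simp [List.cons_beq_cons, heq]

-- ===== VERDICT (by name: the statement is the Claim_ definition above) =====
theorem isKingStack_spec : Claim_equal_isKingStack := by
  intro cascade _
  unfold Spec_isKingStack isKingStack isKingStack_alt
  match cascade with
  | [] => rfl
  | c0 :: t =>
      by_cases hm : PySem.Int.mod c0 13 ≠ 12
      · simp only [if_pos hm]
      · simp only [if_neg hm]
        rw [PySem.List.enumerate_cons]
        simp only [isKingStackLoop]
        rw [show ((0 : Int) == 0) = true from rfl]
        simp only [if_true]
        rw [isKingStackLoop_eq_range t (0 + 1) c0 (by norm_num)]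
        have hcons : PySem.List.pyRange c0 (c0 - ((c0 :: t).length : Int)) (-1)
            = c0 :: PySem.List.pyRange (c0 - 1) (c0 - ((c0 :: t).length : Int)) (-1) := by
          exact PySem.List.pyRange_neg_one_cons (by simp)
        rw [hcons]
        simp only [List.cons_beq_cons, BEq.rfl, Bool.true_and]
        rw [show c0 - ((c0 :: t).length : Int) = c0 - 1 - (t.length : Int) by simp; omega]
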